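-- pv_equiv track=rewrite | github.com/h-nryan/aq-work-trial | dashboard.py | _render_stage_dots
-- ===== SOURCE A (Python) =====
-- STAGE_ORDER = ["generating", "structural", "functional", "evaluating", "completed", "failed"]
--
-- def _render_stage_dots(current_stage: str, failed_stage: str = "") -> str:
--     """Render compact stage progress as text dots for expander labels."""
--     stages = ["generating", "structural", "functional", "evaluating"]
--     stage_idx = STAGE_ORDER.index(current_stage) if current_stage in STAGE_ORDER else -1
--     dots = []
--     for i, s in enumerate(stages):
--         s_idx = STAGE_ORDER.index(s) if s in STAGE_ORDER else -1
--         if current_stage == "failed" and failed_stage: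
--             fail_map = {"generation": 0, "generating": 0, "structural": 1, "functional": 2, "evaluating": 3, "evaluation": 3}
--             fail_idx = fail_map.get(failed_stage, -1)
--             if i < fail_idx:
--                 dots.append("●")
--             elif i == fail_idx:
--                 dots.append("✗")
--             else:
--                 dots.append("○")
--         elif s_idx < stage_idx:
--             dots.append("●")
--         elif s_idx == stage_idx:
--             dots.append("◉")
--         else:
--             dots.append("○")
--     return "".join(dots)
-- ===== SOURCE B (Python) =====
-- STAGE_ORDER = ["generating", "structural", "functional", "evaluating", "completed", "failed"]
--
-- def _render_stage_dots(current_stage: str, failed_stage: str = "") -> str: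
--     """Render compact stage progress as text dots for expander labels."""
--     if current_stage == "failed" and failed_stage:
--         fail_map = {"generation": 0, "generating": 0, "structural": 1, "functional": 2, "evaluating": 3, "evaluation": 3}
--         pivot, marker = fail_map.get(failed_stage, -1), "✗"
--     else:
--         pivot = STAGE_ORDER.index(current_stage) if current_stage in STAGE_ORDER else -1
--         marker = "◉"
--     if pivot < 0:
--         return "○" * 4
--     if pivot >= 4:
--         return "●" * 4
--     return "●" * pivot + marker + "○" * (3 - pivot)
-- ===== Notes on version B (the rewrite author's own statement) =====
-- stated objective: simpler
-- what changed: Replaces the per-stage loop with branch chains by computing one pivot index and marker glyph, then building the 4-dot string in closed form as '●'*pivot + marker + '○'*rest.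
import Mathlib
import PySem

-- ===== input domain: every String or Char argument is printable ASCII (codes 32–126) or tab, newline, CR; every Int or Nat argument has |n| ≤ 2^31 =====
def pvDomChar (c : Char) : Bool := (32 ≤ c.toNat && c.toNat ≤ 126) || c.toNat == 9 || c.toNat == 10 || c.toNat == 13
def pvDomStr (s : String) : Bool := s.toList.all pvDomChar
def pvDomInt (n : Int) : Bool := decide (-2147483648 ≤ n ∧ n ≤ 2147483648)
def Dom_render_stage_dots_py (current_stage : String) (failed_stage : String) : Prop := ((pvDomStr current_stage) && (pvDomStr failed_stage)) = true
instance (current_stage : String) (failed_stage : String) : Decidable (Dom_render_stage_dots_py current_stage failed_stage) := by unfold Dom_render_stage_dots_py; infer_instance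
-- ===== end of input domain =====

-- B replaces A's per-stage loop over the four stages by a single pivot index + marker and a
-- closed-form string construction ('●'*pivot + marker + '○'*rest); objective: simpler.

-- ===== PORT A =====
def STAGE_ORDER_py : List String := ["generating", "structural", "functional", "evaluating", "completed", "failed"]

-- fail_map literal, shared by both ports (B's Source B spells the same dict literal)
def failMap_py : PySem.Dict String Int :=
  ((((((PySem.Dict.empty).insert "generation" 0).insert "generating" 0).insert "structural" 1).insert "functional" 2).insert "evaluating" 3).insert "evaluation" 3

def render_stage_dots_py (current_stage : String) (failed_stage : String) : String :=
  let stages : List String := ["generating", "structural", "functional", "evaluating"]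
  let stage_idx : Int :=
    if STAGE_ORDER_py.contains current_stage then
      ((PySem.List.index? STAGE_ORDER_py current_stage).getD 0 : Nat) else -1
  let dots : List String := (PySem.List.enumerate stages).foldl (fun (dots : List String) (p : Int × String) =>
    let i := p.1
    let s := p.2
    let s_idx : Int :=
      if STAGE_ORDER_py.contains s then
        ((PySem.List.index? STAGE_ORDER_py s).getD 0 : Nat) else -1
    if current_stage = "failed" ∧ failed_stage ≠ "" then
      let fail_idx : Int := failMap_py.getD failed_stage (-1)
      if i < fail_idx then dots ++ ["●"]
      else if i = fail_idx then dots ++ ["✗"]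
      else dots ++ ["○"]
    else if s_idx < stage_idx then dots ++ ["●"]
    else if s_idx = stage_idx then dots ++ ["◉"]
    else dots ++ ["○"]) []
  PySem.Str.join "" dots

-- ===== PORT B =====
def render_stage_dots_py_alt (current_stage : String) (failed_stage : String) : String :=
  let pm : Int × String :=
    if current_stage = "failed" ∧ failed_stage ≠ "" then
      (failMap_py.getD failed_stage (-1), "✗")
    else
      (if STAGE_ORDER_py.contains current_stage then
        ((PySem.List.index? STAGE_ORDER_py current_stage).getD 0 : Nat) else -1, "◉")
  if pm.1 < 0 then String.ofList (List.replicate 4 '○')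
  else if pm.1 ≥ 4 then String.ofList (List.replicate 4 '●')
  else String.ofList (List.replicate pm.1.toNat '●') ++ pm.2 ++ String.ofList (List.replicate (3 - pm.1).toNat '○')

-- ===== PRECONDITION & SPEC =====
def Spec_render_stage_dots_py (current_stage : String) (failed_stage : String) (out : String) : Prop := out = render_stage_dots_py_alt current_stage failed_stage
instance (current_stage : String) (failed_stage : String) (out : String) : Decidable (Spec_render_stage_dots_py current_stage failed_stage out) := by unfold Spec_render_stage_dots_py; infer_instance

-- ===== CLAIM (what is proved, stated in full; the proofs are below) =====
def Claim_equal_render_stage_dots_py : Prop := ∀ (current_stage : String) (failed_stage : String), Dom_render_stage_dots_py current_stage failed_stage → Spec_render_stage_dots_py current_stage failed_stage (render_stage_dots_py current_stage failed_stage)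

-- ===== LEMMAS AND PROOFS =====
theorem render_eq (cs fs : String) : render_stage_dots_py cs fs = render_stage_dots_py_alt cs fs := by
  by_cases h1 : cs = "failed"
  · subst h1
    by_cases h2 : fs = ""
    · subst h2; decide
    · by_cases k1 : fs = "generation"
      · subst k1; decide
      by_cases k2 : fs = "generating"
      · subst k2; decide
      by_cases k3 : fs = "structural"
      · subst k3; decide
      by_cases k4 : fs = "functional"
      · subst k4; decide
      by_cases k5 : fs = "evaluating"
      · subst k5; decide
      by_cases k6 : fs = "evaluation"
      · subst k6; decide
      have e1 : ("generation" == fs) = false := by simp [Ne.symm k1]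
      have e2 : ("generating" == fs) = false := by simp [Ne.symm k2]
      have e3 : ("structural" == fs) = false := by simp [Ne.symm k3]
      have e4 : ("functional" == fs) = false := by simp [Ne.symm k4]
      have e5 : ("evaluating" == fs) = false := by simp [Ne.symm k5]
      have e6 : ("evaluation" == fs) = false := by simp [Ne.symm k6]
      have hf : failMap_py.getD fs (-1) = -1 := by
        simp [failMap_py, PySem.Dict.getD, PySem.Dict.get?, PySem.Dict.insert, PySem.Dict.empty,
              List.find?, e1, e2, e3, e4, e5, e6]
      simp only [render_stage_dots_py, render_stage_dots_py_alt, PySem.List.enumerate, hf]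
      simp [h2]
      decide
  · by_cases c1 : cs = "generating"
    · subst c1; simp [render_stage_dots_py, render_stage_dots_py_alt]; decide
    by_cases c2 : cs = "structural"
    · subst c2; simp [render_stage_dots_py, render_stage_dots_py_alt]; decide
    by_cases c3 : cs = "functional"
    · subst c3; simp [render_stage_dots_py, render_stage_dots_py_alt]; decide
    by_cases c4 : cs = "evaluating"
    · subst c4; simp [render_stage_dots_py, render_stage_dots_py_alt]; decide
    by_cases c5 : cs = "completed"
    · subst c5; simp [render_stage_dots_py, render_stage_dots_py_alt]; decide
    · simp only [render_stage_dots_py, render_stage_dots_py_alt, STAGE_ORDER_py,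
            PySem.List.enumerate]
      simp [h1, c1, c2, c3, c4, c5]
      decide

-- ===== VERDICT (by name: the statement is the Claim_ definition above) =====
theorem render_stage_dots_py_spec : Claim_equal_render_stage_dots_py := by
  intro cs fs _
  unfold Spec_render_stage_dots_py
  exact render_eq cs fs
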